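-- pv_equiv track=rewrite | github.com/ikeshou/Kyoupuro_library_python | 1_algorithms/4_syakutori.py | scan_longest_interval_lt_eq_x
-- ===== SOURCE A (Python) =====
-- def scan_longest_interval_lt_eq_x(L, x):
--     """
--     L = {a_i | a_i >=0} とする
--     a_1...a_n のうち、区間和が x 以下であるような区間を O(n) で探索する。
--     満足する区間の数と、そのうち最長の区間全てのリストを返す
--
--     >>> cnt, longest_intervals = scan_longest_interval_lt_eq_x([6,3,8,1,10], 12)
--     >>> cnt
--     10
--     >>> longest_intervals
--     [(1, 4)]
--     """
--     assert(all(map(lambda x:x>=0, L)))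
--     n = len(L)
--     cnt = 0
--     max_size = 0
--     longest_intervals = []
--     right_end = 0
--     summation = 0
--     for left in range(0, n):
--         while right_end < n and summation + L[right_end] <= x:
--             summation += L[right_end]
--             right_end += 1
--         # 終了時に summation は sum(L[left:right_end]) を表す。[left, right_end) は (left を左端に固定した時の) 最長インターバル
--         size = right_end - left
--         if max_size < size:
--             max_size = size
--             longest_intervals = [(left, right_end)]
--         elif max_size == size:
--             longest_intervals.append((left, right_end))
--         cnt += size
--         # 尺取りで完全に区間が潰れたら right_end も動かす
--         if right_end == left:
--             right_end += 1
--         else: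
--             summation -= L[left]
--     return cnt, longest_intervals
-- ===== SOURCE B (Python) =====
-- def scan_longest_interval_lt_eq_x(L, x):
--     """Prefix-sum re-implementation: for each left endpoint, the furthest right
--     end is read off the monotone prefix-sum table by counting how many prefix
--     sums stay <= prefix[left] + x, instead of sliding an amortized right pointer."""
--     assert(all(map(lambda x: x >= 0, L)))
--     n = len(L)
--     prefix = [0]
--     for a in L:
--         prefix.append(prefix[-1] + a)
--     cnt = 0
--     max_size = 0
--     longest_intervals = []
--     for left in range(n):
--         target = prefix[left] + x
--         r = sum(1 for p in prefix if p <= target) - 1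
--         right_end = r if r > left else left
--         size = right_end - left
--         if max_size < size:
--             max_size = size
--             longest_intervals = [(left, right_end)]
--         elif max_size == size:
--             longest_intervals.append((left, right_end))
--         cnt += size
--     return cnt, longest_intervals
-- ===== Notes on version B (the rewrite author's own statement) =====
-- stated objective: alternative
-- what changed: Replaces A's amortized two-pointer sliding window with a precomputed prefix-sum table from which each left endpoint's furthest right end is read off independently by a threshold count over the monotone table.
import Mathlib
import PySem

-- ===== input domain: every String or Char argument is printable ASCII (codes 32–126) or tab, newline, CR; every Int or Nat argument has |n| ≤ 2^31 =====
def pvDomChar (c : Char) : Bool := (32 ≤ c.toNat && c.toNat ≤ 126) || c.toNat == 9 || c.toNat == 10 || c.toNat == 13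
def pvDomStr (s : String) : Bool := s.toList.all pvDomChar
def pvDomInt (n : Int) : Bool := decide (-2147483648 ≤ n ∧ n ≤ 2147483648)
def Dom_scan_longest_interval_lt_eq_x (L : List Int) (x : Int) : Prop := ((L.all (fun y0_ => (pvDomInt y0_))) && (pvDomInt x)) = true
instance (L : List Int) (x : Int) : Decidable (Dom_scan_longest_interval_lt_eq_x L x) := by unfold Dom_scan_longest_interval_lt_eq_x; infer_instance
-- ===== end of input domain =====

-- B replaces A's amortized two-pointer sweep by a prefix-sum table: for each left
-- endpoint the furthest right end is read off by counting prefix sums ≤ prefix[left]+x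
-- (objective: alternative algorithm, not faster).

-- ===== PORT A =====
-- the inner `while right_end < n and summation + L[right_end] <= x` loop
def pvAWhile (L : List Int) (x : Int) (right_end : Nat) (summation : Int) : Nat × Int :=
  if h : right_end < L.length ∧ summation + L.getD right_end 0 ≤ x then
    pvAWhile L x (right_end + 1) (summation + L.getD right_end 0)
  else (right_end, summation)
termination_by L.length - right_end
decreasing_by omega

-- one iteration of A's `for left in range(0, n)` body; state = (cnt, max_size, longest_intervals, right_end, summation)
def pvAStep (L : List Int) (x : Int)
    (st : Int × Int × List (Int × Int) × Nat × Int) (left : Nat) :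
    Int × Int × List (Int × Int) × Nat × Int :=
  let w := pvAWhile L x st.2.2.2.1 st.2.2.2.2
  let size : Int := (w.1 : Int) - (left : Int)
  let ms' : Int := if st.2.1 < size then size else st.2.1
  let li' : List (Int × Int) :=
    if st.2.1 < size then [((left : Int), (w.1 : Int))]
    else if st.2.1 = size then st.2.2.1 ++ [((left : Int), (w.1 : Int))]
    else st.2.2.1
  let cnt' : Int := st.1 + size
  if w.1 = left then (cnt', ms', li', w.1 + 1, w.2)
  else (cnt', ms', li', w.1, w.2 - L.getD left 0)

def scan_longest_interval_lt_eq_x (L : List Int) (x : Int) : Int × (List (Int × Int)) :=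
  let st := (List.range L.length).foldl (pvAStep L x) (0, 0, [], 0, 0)
  (st.1, st.2.2.1)

-- ===== PORT B =====
-- the `prefix = [0]; for a in L: prefix.append(prefix[-1] + a)` loop
def pvPrefixTable (L : List Int) : List Int :=
  L.foldl (fun acc a => acc ++ [acc.getLastD 0 + a]) [0]

-- one iteration of B's loop body; state = (cnt, max_size, longest_intervals)
def pvBStep (x : Int) (pre : List Int)
    (st : Int × Int × List (Int × Int)) (left : Nat) :
    Int × Int × List (Int × Int) :=
  let target : Int := pre.getD left 0 + x
  let r : Int := (pre.countP (fun p => decide (p ≤ target)) : Int) - 1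
  let right_end : Int := if r > (left : Int) then r else (left : Int)
  let size : Int := right_end - (left : Int)
  let ms' : Int := if st.2.1 < size then size else st.2.1
  let li' : List (Int × Int) :=
    if st.2.1 < size then [((left : Int), right_end)]
    else if st.2.1 = size then st.2.2 ++ [((left : Int), right_end)]
    else st.2.2
  (st.1 + size, ms', li')

def scan_longest_interval_lt_eq_x_alt (L : List Int) (x : Int) : Int × (List (Int × Int)) :=
  let pre := pvPrefixTable L
  let st := (List.range L.length).foldl (pvBStep x pre) (0, 0, [])
  (st.1, st.2.2)

-- ===== PRECONDITION & SPEC =====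
-- Pre_ excludes lists containing a negative element, on which A's `assert` raises AssertionError.
def Pre_scan_longest_interval_lt_eq_x (L : List Int) (x : Int) : Prop := ∀ a ∈ L, 0 ≤ a
instance (L : List Int) (x : Int) : Decidable (Pre_scan_longest_interval_lt_eq_x L x) := by
  unfold Pre_scan_longest_interval_lt_eq_x; infer_instance

def pvWitness_scan_longest_interval_lt_eq_x : List Int × Int := ([6, 3, 8, 1, 10], 12)

def Spec_scan_longest_interval_lt_eq_x (L : List Int) (x : Int) (out : Int × (List (Int × Int))) : Prop := out = scan_longest_interval_lt_eq_x_alt L x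
instance (L : List Int) (x : Int) (out : Int × (List (Int × Int))) : Decidable (Spec_scan_longest_interval_lt_eq_x L x out) := by unfold Spec_scan_longest_interval_lt_eq_x; infer_instance

-- ===== CLAIM (what is proved, stated in full; the proofs are below) =====
def Claim_equal_scan_longest_interval_lt_eq_x : Prop := ∀ (L : List Int) (x : Int), Dom_scan_longest_interval_lt_eq_x L x → Pre_scan_longest_interval_lt_eq_x L x → Spec_scan_longest_interval_lt_eq_x L x (scan_longest_interval_lt_eq_x L x)

-- ===== LEMMAS AND PROOFS =====

-- prefix sums as a function
def pvPref (L : List Int) (i : Nat) : Int := (L.take i).sum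

theorem pvPref_succ (L : List Int) (i : Nat) :
    pvPref L (i + 1) = pvPref L i + L.getD i 0 := by
  unfold pvPref
  by_cases h : i < L.length
  · rw [List.take_add_one, List.sum_append, List.getD_eq_getElem L 0 h,
      List.getElem?_eq_getElem h]
    simp
  · rw [List.take_of_length_le (by omega), List.take_of_length_le (by omega),
      List.getD_eq_default L 0 (by omega)]
    omega

theorem pvGetD_nonneg (L : List Int) (h : ∀ a ∈ L, 0 ≤ a) (i : Nat) : 0 ≤ L.getD i 0 := by
  by_cases hi : i < L.length
  · rw [List.getD_eq_getElem L 0 hi]; exact h _ (List.getElem_mem hi)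
  · rw [List.getD_eq_default L 0 (by omega)]

theorem pvPref_mono (L : List Int) (h : ∀ a ∈ L, 0 ≤ a) {i j : Nat} (hij : i ≤ j) :
    pvPref L i ≤ pvPref L j := by
  induction j with
  | zero =>
    have : i = 0 := by omega
    subst this; exact le_refl _
  | succ k ih =>
    rcases Nat.lt_or_ge i (k+1) with hk | hk
    · have := ih (by omega)
      have h2 := pvGetD_nonneg L h k
      rw [pvPref_succ]; omega
    · have : i = k + 1 := by omega
      subst this; exact le_refl _

theorem pvPrefixTable_eq (L : List Int) :
    pvPrefixTable L = (List.range (L.length + 1)).map (pvPref L) := by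
  induction L using List.reverseRecOn with
  | nil => simp [pvPrefixTable, pvPref]
  | append_singleton M a ih =>
    unfold pvPrefixTable at *
    rw [List.foldl_append, ih]
    simp only [List.foldl_cons, List.foldl_nil]
    have hmaps : ∀ (K : List Nat), (∀ i ∈ K, i ≤ M.length) →
        K.map (pvPref M) = K.map (pvPref (M ++ [a])) := by
      intro K hK
      apply List.map_congr_left
      intro i hi
      unfold pvPref
      rw [List.take_append_of_le_length (hK i hi)]
    have hlast : ((List.range (M.length + 1)).map (pvPref M)).getLastD 0 = pvPref M M.length := by
      rw [List.range_succ, List.map_append]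
      simp
    rw [hlast]
    rw [List.length_append, List.length_singleton,
      List.range_succ (n := M.length + 1), List.map_append]
    congr 1
    · exact hmaps _ (fun i hi => by have := List.mem_range.mp hi; omega)
    · simp only [List.map_cons, List.map_nil]
      unfold pvPref
      have htk : (M ++ [a]).take (M.length + 1) = M ++ [a] := List.take_of_length_le (by simp)
      rw [htk, List.sum_append]
      simp

theorem pvCountP_range_iff (q : Nat → Bool) (hq : ∀ i j, i ≤ j → q j = true → q i = true) :
    ∀ m i, i < m → (i < (List.range m).countP q ↔ q i = true) := by
  intro m
  induction m with
  | zero => intro i hi; omega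
  | succ k ih =>
    intro i hi
    have hc_le : (List.range k).countP q ≤ k := by
      calc (List.range k).countP q ≤ (List.range k).length := List.countP_le_length
        _ = k := List.length_range
    rw [List.range_succ, List.countP_append]
    by_cases hk : q k = true
    · have hck : (List.range k).countP q = k := by
        rcases Nat.eq_zero_or_pos k with h0 | hpos
        · subst h0; omega
        · have : k - 1 < (List.range k).countP q :=
            (ih (k-1) (by omega)).mpr (hq (k-1) k (by omega) hk)
          omega
      have hqi : q i = true := hq i k (by omega) hk
      simp [hk, hck, hqi]
      omega
    · have hqk' : q k = false := by simpa using hk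
      simp only [List.countP_cons, List.countP_nil, hqk']
      rcases Nat.lt_or_ge i k with hik | hik
      · simpa using ih i hik
      · have : i = k := by omega
        subst this
        simp [hqk']
        omega

theorem pvAWhile_spec (L : List Int) (x : Int) (left : Nat) :
    ∀ d re s, L.length - re ≤ d → re ≤ L.length → s = pvPref L re - pvPref L left →
    re ≤ (pvAWhile L x re s).1 ∧ (pvAWhile L x re s).1 ≤ L.length ∧
    (pvAWhile L x re s).2 = pvPref L (pvAWhile L x re s).1 - pvPref L left ∧
    ((pvAWhile L x re s).1 = re ∨ pvPref L (pvAWhile L x re s).1 ≤ pvPref L left + x) ∧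
    ¬((pvAWhile L x re s).1 < L.length ∧ pvPref L ((pvAWhile L x re s).1 + 1) ≤ pvPref L left + x) := by
  intro d
  induction d with
  | zero =>
    intro re s hd hre hs
    rw [pvAWhile]
    rw [dif_neg (by omega : ¬(re < L.length ∧ s + L.getD re 0 ≤ x))]
    refine ⟨le_refl _, hre, hs, Or.inl rfl, ?_⟩
    rintro ⟨h1, _⟩; omega
  | succ k ih =>
    intro re s hd hre hs
    rw [pvAWhile]
    by_cases hc : re < L.length ∧ s + L.getD re 0 ≤ x
    · rw [dif_pos hc]
      have hps := pvPref_succ L re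
      have hstep : s + L.getD re 0 = pvPref L (re + 1) - pvPref L left := by omega
      obtain ⟨h1, h2, h3, h4, h5⟩ := ih (re + 1) (s + L.getD re 0) (by omega) (by omega) hstep
      refine ⟨by omega, h2, h3, ?_, h5⟩
      right
      rcases h4 with h4 | h4
      · rw [h4]; omega
      · exact h4
    · rw [dif_neg hc]
      have hps := pvPref_succ L re
      refine ⟨le_refl _, hre, hs, Or.inl rfl, ?_⟩
      show ¬(re < L.length ∧ pvPref L (re + 1) ≤ pvPref L left + x)
      rintro ⟨ha, hb⟩
      exact hc ⟨ha, by omega⟩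

def pvProjA (st : Int × Int × List (Int × Int) × Nat × Int) : Int × Int × List (Int × Int) :=
  (st.1, st.2.1, st.2.2.1)

theorem pvMain (L : List Int) (x : Int) (hpre : ∀ a ∈ L, 0 ≤ a) :
    ∀ d left, left + d = L.length →
    ∀ (cnt ms : Int) (li : List (Int × Int)) (re : Nat) (s : Int),
    left ≤ re → re ≤ L.length → s = pvPref L re - pvPref L left →
    (re = left ∨ pvPref L re ≤ pvPref L left + x) →
    pvProjA ((List.range' left d).foldl (pvAStep L x) (cnt, ms, li, re, s))
      = (List.range' left d).foldl (pvBStep x (pvPrefixTable L)) (cnt, ms, li) := by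
  intro d
  induction d with
  | zero => intro left _ cnt ms li re s _ _ _ _; simp [pvProjA, List.range']
  | succ k ih =>
    intro left hlen cnt ms li re s hlre hren hs hfeas
    rw [List.range'_succ, List.foldl_cons, List.foldl_cons]
    -- A's while loop result
    obtain ⟨hw1, hw2, hw3, hw4, hw5⟩ :=
      pvAWhile_spec L x left (L.length - re) re s (le_refl _) hren hs
    set w := pvAWhile L x re s with hwdef
    -- the downward-closed predicate counted by B
    set q : Nat → Bool := fun i => decide (pvPref L i ≤ pvPref L left + x) with hq
    have hqdc : ∀ i j : Nat, i ≤ j → q j = true → q i = true := by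
      intro i j hij hj
      simp only [hq, decide_eq_true_eq] at hj ⊢
      exact le_trans (pvPref_mono L hpre hij) hj
    have hcount := pvCountP_range_iff q hqdc (L.length + 1)
    set c := (List.range (L.length + 1)).countP q with hcdef
    have hc_le : c ≤ L.length + 1 := by
      calc c ≤ (List.range (L.length + 1)).length := List.countP_le_length
        _ = L.length + 1 := List.length_range
    -- identify A's right_end with B's
    have hkey : (w.1 = left ∧ c ≤ left) ∨ (pvPref L w.1 ≤ pvPref L left + x ∧ c = w.1 + 1) := by
      by_cases hfs : pvPref L re ≤ pvPref L left + x
      · right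
        have hwle : pvPref L w.1 ≤ pvPref L left + x := by
          rcases hw4 with h | h
          · rw [h]; exact hfs
          · exact h
        have h1 : w.1 < c := by
          refine (hcount w.1 (by omega)).mpr ?_
          simp only [hq, decide_eq_true_eq]
          exact hwle
        have h2 : c ≤ w.1 + 1 := by
          by_cases hn : w.1 < L.length
          · by_contra hgt
            have hqw : q (w.1 + 1) = true := (hcount (w.1 + 1) (by omega)).mp (by omega)
            simp only [hq, decide_eq_true_eq] at hqw
            exact hw5 ⟨hn, hqw⟩
          · omega
        exact ⟨hwle, by omega⟩
      · left
        have hrl : re = left := by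
          rcases hfeas with h | h
          · exact h
          · exact absurd h hfs
        have hwre : w.1 = re := by
          rcases hw4 with h | h
          · exact h
          · exfalso
            exact hfs (le_trans (pvPref_mono L hpre hw1) h)
        have hcl : c ≤ left := by
          by_contra hgt
          have hql : q left = true := (hcount left (by omega)).mp (by omega)
          simp only [hq, decide_eq_true_eq] at hql
          exact hfs (by rw [hrl]; exact hql)
        exact ⟨by omega, hcl⟩
    have hBre : (if ((c : Int) - 1) > (left : Nat) then ((c : Int) - 1) else ((left : Nat) : Int))
        = (w.1 : Int) := by
      rcases hkey with ⟨h1, h2⟩ | ⟨h1, h2⟩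
      · rw [if_neg (by omega)]; omega
      · split_ifs with hgt
        · omega
        · omega
    -- B's table reads
    have hpt : (pvPrefixTable L).getD left 0 = pvPref L left := by
      rw [pvPrefixTable_eq, List.getD_eq_getElem _ 0 (by simp; omega)]
      simp
    have hcp : (pvPrefixTable L).countP (fun p => decide (p ≤ pvPref L left + x)) = c := by
      rw [pvPrefixTable_eq, List.countP_map, hcdef]
      rfl
    -- reduce B's step
    have hB : pvBStep x (pvPrefixTable L) (cnt, ms, li) left =
        (cnt + ((w.1 : Int) - (left : Nat)),
         (if ms < (w.1 : Int) - (left : Nat) then (w.1 : Int) - (left : Nat) else ms),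
         (if ms < (w.1 : Int) - (left : Nat) then [(((left : Nat) : Int), (w.1 : Int))]
          else if ms = (w.1 : Int) - (left : Nat) then li ++ [(((left : Nat) : Int), (w.1 : Int))]
          else li)) := by
      simp only [pvBStep, hpt, hcp, hBre]
    rw [hB]
    by_cases hwl : w.1 = left
    · have hA : pvAStep L x (cnt, ms, li, re, s) left =
          (cnt + ((w.1 : Int) - (left : Nat)),
           (if ms < (w.1 : Int) - (left : Nat) then (w.1 : Int) - (left : Nat) else ms),
           (if ms < (w.1 : Int) - (left : Nat) then [(((left : Nat) : Int), (w.1 : Int))]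
            else if ms = (w.1 : Int) - (left : Nat) then li ++ [(((left : Nat) : Int), (w.1 : Int))]
            else li),
           w.1 + 1, w.2) := by
        simp only [pvAStep, ← hwdef, if_pos hwl]
      rw [hA]
      have hs0 : w.2 = pvPref L (left + 1) - pvPref L (left + 1) := by
        rw [hw3, hwl]; ring
      exact ih (left + 1) (by omega) _ _ _ (w.1 + 1) w.2 (by omega) (by omega) (by rw [hwl]; exact hs0) (Or.inl (by omega))
    · have hA : pvAStep L x (cnt, ms, li, re, s) left =
          (cnt + ((w.1 : Int) - (left : Nat)),
           (if ms < (w.1 : Int) - (left : Nat) then (w.1 : Int) - (left : Nat) else ms),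
           (if ms < (w.1 : Int) - (left : Nat) then [(((left : Nat) : Int), (w.1 : Int))]
            else if ms = (w.1 : Int) - (left : Nat) then li ++ [(((left : Nat) : Int), (w.1 : Int))]
            else li),
           w.1, w.2 - L.getD left 0) := by
        simp only [pvAStep, ← hwdef, if_neg hwl]
      rw [hA]
      have hfw : pvPref L w.1 ≤ pvPref L left + x := by
        rcases hkey with ⟨h1, _⟩ | ⟨h1, _⟩
        · exact absurd h1 hwl
        · exact h1
      have hps := pvPref_succ L left
      have hmono : pvPref L left ≤ pvPref L (left + 1) := pvPref_mono L hpre (Nat.le_succ left)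
      exact ih (left + 1) (by omega) _ _ _ w.1 (w.2 - L.getD left 0) (by omega) hw2 (by omega) (Or.inr (by omega))

-- ===== VERDICT (by name: the statement is the Claim_ definition above) =====
theorem scan_longest_interval_lt_eq_x_spec : Claim_equal_scan_longest_interval_lt_eq_x := by
  intro L x _hdom hpre
  unfold Spec_scan_longest_interval_lt_eq_x
  simp only [scan_longest_interval_lt_eq_x, scan_longest_interval_lt_eq_x_alt]
  have h := pvMain L x hpre L.length 0 (by omega) 0 0 [] 0 0 (le_refl 0) (Nat.zero_le _)
    (by simp [pvPref]) (Or.inl rfl)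
  rw [List.range_eq_range', ← h]
  simp [pvProjA]
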